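-- pv_equiv track=rewrite | github.com/monkeybutter/circular_tree | util.py | bound_checker
-- ===== SOURCE A (Python) =====
-- def bound_checker(bounds):
--     prev = (None, None)
--
--     for bound in bounds:
--         if not bound[0] < bound[1]:
--             return False
--         if None not in prev and prev[1] >= bound[0]:
--             return False
--
--         prev = bound
--
--     return True
-- ===== SOURCE B (Python) =====
-- def bound_checker(bounds):
--     flat = [x for b in bounds for x in b]
--     return len(set(flat)) == len(flat) and sorted(flat) == flat
-- ===== Notes on version B (the rewrite author's own statement) =====
-- stated objective: alternative
-- what changed: Flattens the bounds into one coordinate list and decides validity by a set-cardinality duplicate test plus comparing the list with its sorted copy (strictly increasing iff duplicate-free and already sorted), replacing A's streaming prev-accumulator loop with early exits.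
import Mathlib
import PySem

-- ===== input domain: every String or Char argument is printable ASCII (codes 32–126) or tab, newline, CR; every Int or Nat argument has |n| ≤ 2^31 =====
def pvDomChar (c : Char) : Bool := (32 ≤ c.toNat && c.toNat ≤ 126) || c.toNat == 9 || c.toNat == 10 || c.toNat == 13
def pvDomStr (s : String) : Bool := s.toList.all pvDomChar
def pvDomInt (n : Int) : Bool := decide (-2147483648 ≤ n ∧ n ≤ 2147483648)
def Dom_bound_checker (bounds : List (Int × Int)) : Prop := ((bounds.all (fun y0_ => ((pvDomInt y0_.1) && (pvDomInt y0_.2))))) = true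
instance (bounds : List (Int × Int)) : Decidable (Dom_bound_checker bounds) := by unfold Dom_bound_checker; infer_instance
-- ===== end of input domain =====

-- B: flatten the bounds into one coordinate list and decide by sorting — duplicate-free (set cardinality)
-- and equal to its sorted copy — instead of A's streaming prev-accumulator loop (alternative algorithm, same result).

-- ===== PORT A =====
-- A's loop over `bounds` carrying prev; prev = (None, None) initially is modelled as `none`.
def bcGoA (bounds : List (Int × Int)) (prev : Option (Int × Int)) : Bool :=
  match bounds with
  | [] => true
  | b :: rest =>
    if ¬ (b.1 < b.2) then false
    else
      match prev with
      | some p => if p.2 ≥ b.1 then false else bcGoA rest (some b)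
      | none => bcGoA rest (some b)

def bound_checker (bounds : List (Int × Int)) : Bool := bcGoA bounds none

-- ===== PORT B =====
def bound_checker_alt (bounds : List (Int × Int)) : Bool :=
  let flat := bounds.flatMap (fun b => [b.1, b.2])
  decide ((PySem.Set.ofList flat).length = flat.length)
    && decide (PySem.List.sorted flat (fun x => x) = flat)

-- ===== PRECONDITION & SPEC =====
def Spec_bound_checker (bounds : List (Int × Int)) (out : Bool) : Prop := out = bound_checker_alt bounds
instance (bounds : List (Int × Int)) (out : Bool) : Decidable (Spec_bound_checker bounds out) := by unfold Spec_bound_checker; infer_instance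

-- ===== CLAIM (what is proved, stated in full; the proofs are below) =====
def Claim_equal_bound_checker : Prop := ∀ (bounds : List (Int × Int)), Dom_bound_checker bounds → Spec_bound_checker bounds (bound_checker bounds)

-- ===== LEMMAS AND PROOFS =====

-- A's loop decides the strict-chain condition on the flattened coordinates.
theorem bcGoA_some_chain (bounds : List (Int × Int)) :
    ∀ q : Int × Int,
    (bcGoA bounds (some q) = true
      ↔ List.IsChain (· < ·) (q.2 :: bounds.flatMap (fun b => [b.1, b.2]))) := by
  induction bounds with
  | nil => intro q; simp [bcGoA]
  | cons b rest ih =>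
    intro q
    simp only [bcGoA, List.flatMap_cons, List.cons_append, List.nil_append,
      List.isChain_cons_cons]
    by_cases h1 : b.1 < b.2 <;> by_cases h2 : q.2 ≥ b.1 <;>
      simp [h1, h2, ih b] <;> omega

theorem bound_checker_eq_pairwise (bounds : List (Int × Int)) :
    (bound_checker bounds = true
      ↔ (bounds.flatMap (fun b => [b.1, b.2])).Pairwise (· < ·)) := by
  rw [← List.isChain_iff_pairwise]
  cases bounds with
  | nil => simp [bound_checker, bcGoA]
  | cons b rest =>
    unfold bound_checker
    simp only [bcGoA, List.flatMap_cons, List.cons_append, List.nil_append,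
      List.isChain_cons_cons]
    by_cases h1 : b.1 < b.2 <;> simp [h1, bcGoA_some_chain rest b]

-- set(xs) (first occurrences) is a sublist of xs.
theorem foldl_add_sublist {α : Type} [BEq α] (xs : List α) :
    ∀ s : List α, ∃ t : List α, xs.foldl PySem.Set.add s = s ++ t ∧ t.Sublist xs := by
  induction xs with
  | nil => intro s; exact ⟨[], by simp⟩
  | cons x xs ih =>
    intro s
    simp only [List.foldl_cons]
    by_cases hc : PySem.Set.contains s x
    · have hadd : PySem.Set.add s x = s := by unfold PySem.Set.add; rw [if_pos hc]
      obtain ⟨t, ht, hs⟩ := ih s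
      exact ⟨t, by rw [hadd]; exact ht, hs.cons _⟩
    · have hadd : PySem.Set.add s x = s ++ [x] := by unfold PySem.Set.add; rw [if_neg hc]
      obtain ⟨t, ht, hs⟩ := ih (s ++ [x])
      exact ⟨x :: t, by rw [hadd, ht]; simp, hs.cons₂ _⟩

theorem ofList_length_eq_iff_nodup (xs : List Int) :
    ((PySem.Set.ofList xs).length = xs.length) ↔ xs.Nodup := by
  obtain ⟨t, ht, hs⟩ := foldl_add_sublist xs ([] : List Int)
  have hof : PySem.Set.ofList xs = t := by
    rw [PySem.Set.ofList_eq_foldl, ht]; simp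
  constructor
  · intro hlen
    have heq : t = xs := hs.eq_of_length (by rw [← hof]; exact hlen)
    have hnd := PySem.Set.nodup_ofList (xs := xs)
    rwa [hof, heq] at hnd
  · intro hnd
    have hndo := PySem.Set.nodup_ofList (xs := xs)
    have hfin : xs.toFinset = (PySem.Set.ofList xs).toFinset := by
      ext a; simp [PySem.Set.mem_ofList]
    have h1 : xs.length = xs.toFinset.card := (List.toFinset_card_of_nodup hnd).symm
    have h2 : (PySem.Set.ofList xs).toFinset.card = (PySem.Set.ofList xs).length :=
      List.toFinset_card_of_nodup hndo
    rw [h1, hfin, h2]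

theorem sorted_eq_self_iff (xs : List Int) :
    (PySem.List.sorted xs (fun x => x) = xs) ↔ xs.Pairwise (· ≤ ·) := by
  constructor
  · intro h
    have hp := PySem.List.sorted_pairwise (xs := xs) (key := fun x => x)
    rwa [h] at hp
  · intro h
    exact PySem.List.sorted_eq_self_of_pairwise xs (fun x => x) h

theorem pairwise_lt_iff_nodup_le (xs : List Int) :
    xs.Pairwise (· < ·) ↔ (xs.Nodup ∧ xs.Pairwise (· ≤ ·)) := by
  constructor
  · intro h
    exact ⟨h.imp (fun hab => by omega), h.imp (fun hab => by omega)⟩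
  · rintro ⟨hnd, hle⟩
    exact (hnd.and hle).imp (fun hab => by omega)

-- ===== VERDICT (by name: the statement is the Claim_ definition above) =====
theorem bound_checker_spec : Claim_equal_bound_checker := by
  intro bounds _
  unfold Spec_bound_checker bound_checker_alt
  rw [Bool.eq_iff_iff]
  simp only [decide_eq_true_eq, Bool.and_eq_true]
  rw [bound_checker_eq_pairwise, ofList_length_eq_iff_nodup, sorted_eq_self_iff,
    pairwise_lt_iff_nodup_le]
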